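-- pv_equiv track=rewrite | github.com/Ashir1501/crm | utils/charts.py | generate_color_palette_border
-- ===== SOURCE A (Python) =====
-- borderColor= ['rgb(255, 0, 0)','rgb(255, 153, 0)','rgb(51, 51, 204)','rgb(204, 255, 51)','rgb(0, 102, 0)','rgb(255, 0, 102)','rgb(204, 0, 255)']
--
-- def generate_color_palette_border(amount):
--     palette = []
--
--     i = 0
--     while i < len(borderColor) and len(palette) < amount:
--         palette.append(borderColor[i])
--         i += 1
--         if i == len(borderColor) and len(palette) < amount:
--             i = 0
--
--     return palette
-- ===== SOURCE B (Python) =====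
-- borderColor= ['rgb(255, 0, 0)','rgb(255, 153, 0)','rgb(51, 51, 204)','rgb(204, 255, 51)','rgb(0, 102, 0)','rgb(255, 0, 102)','rgb(204, 0, 255)']
--
-- def generate_color_palette_border(amount):
--     n = amount // 7 + 1
--     return (borderColor * n)[:amount]
-- ===== Notes on version B (the rewrite author's own statement) =====
-- stated objective: faster
-- what changed: Replaces the element-wise while loop with a modulo-reset index by block repetition: repeat the whole color list enough times with list multiplication and truncate with a slice.
import Mathlib
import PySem

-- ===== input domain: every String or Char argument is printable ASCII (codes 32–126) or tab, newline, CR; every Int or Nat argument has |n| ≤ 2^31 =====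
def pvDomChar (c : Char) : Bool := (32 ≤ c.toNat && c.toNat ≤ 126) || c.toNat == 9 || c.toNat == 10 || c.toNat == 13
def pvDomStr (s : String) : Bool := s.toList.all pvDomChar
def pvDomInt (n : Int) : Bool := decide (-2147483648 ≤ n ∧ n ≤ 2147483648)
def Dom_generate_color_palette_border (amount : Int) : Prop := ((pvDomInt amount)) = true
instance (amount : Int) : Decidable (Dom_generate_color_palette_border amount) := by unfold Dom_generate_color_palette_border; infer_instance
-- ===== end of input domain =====

-- B replaces A's element-wise cyclic-index loop by block repetition: repeat the whole
-- 7-color list amount//7+1 times and truncate with a slice (faster by a constant factor: bulk list ops instead of per-element appends).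

-- ===== PORT A =====
def pvBorderColor : List String :=
  ["rgb(255, 0, 0)", "rgb(255, 153, 0)", "rgb(51, 51, 204)", "rgb(204, 255, 51)",
   "rgb(0, 102, 0)", "rgb(255, 0, 102)", "rgb(204, 0, 255)"]

-- the while loop of A, step for step: state (palette, i)
def pvALoop (amount : Int) (palette : List String) (i : Nat) : List String :=
  if h : i < pvBorderColor.length ∧ (palette.length : Int) < amount then
    let palette' := palette ++ [pvBorderColor[i]!]
    let i1 := i + 1
    let i2 := if i1 = pvBorderColor.length ∧ (palette'.length : Int) < amount then 0 else i1
    pvALoop amount palette' i2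
  else palette
termination_by (amount - palette.length).toNat
decreasing_by simp only [List.length_append, List.length_cons, List.length_nil]; omega

def generate_color_palette_border (amount : Int) : List String := pvALoop amount [] 0

-- ===== PORT B =====
def generate_color_palette_border_alt (amount : Int) : List String :=
  let n := PySem.Int.floordiv amount 7 + 1
  PySem.List.slice ((List.replicate n.toNat pvBorderColor).flatten) none (some amount)

-- ===== PRECONDITION & SPEC =====
def Spec_generate_color_palette_border (amount : Int) (out : List String) : Prop := out = generate_color_palette_border_alt amount
instance (amount : Int) (out : List String) : Decidable (Spec_generate_color_palette_border amount out) := by unfold Spec_generate_color_palette_border; infer_instance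

-- ===== CLAIM (what is proved, stated in full; the proofs are below) =====
def Claim_equal_generate_color_palette_border : Prop := ∀ (amount : Int), Dom_generate_color_palette_border amount → Spec_generate_color_palette_border amount (generate_color_palette_border amount)

-- ===== LEMMAS AND PROOFS =====

-- the n first elements of the cyclic color sequence starting at index i
def pvCyc : Nat → Nat → List String
  | 0, _ => []
  | n+1, i => pvBorderColor[i]! :: pvCyc n ((i + 1) % 7)

theorem pvALoop_eq_cyc (amount : Int) : ∀ n palette i, i < 7 →
    (amount - palette.length).toNat = n → pvALoop amount palette i = palette ++ pvCyc n i := by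
  intro n
  induction n with
  | zero =>
    intro palette i hi hn
    rw [pvALoop]
    have : ¬ ((palette.length : Int) < amount) := by omega
    simp [pvCyc, this]
  | succ n ih =>
    intro palette i hi hn
    rw [pvALoop]
    have hlt : (palette.length : Int) < amount := by omega
    have hcond : i < pvBorderColor.length ∧ (palette.length : Int) < amount := by
      refine ⟨?_, hlt⟩; simp [pvBorderColor]; omega
    rw [dif_pos hcond]
    by_cases hrest : ((palette ++ [pvBorderColor[i]!]).length : Int) < amount
    · -- loop will continue: next index is (i+1) % 7
      have hi2 : (if i + 1 = pvBorderColor.length ∧ ((palette ++ [pvBorderColor[i]!]).length : Int) < amount then 0 else i + 1) = (i + 1) % 7 := by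
        simp only [pvBorderColor, List.length_cons, List.length_nil]
        split_ifs with h
        · omega
        · have : i + 1 < 7 := by
            rcases Nat.lt_or_ge (i+1) 7 with h7 | h7
            · exact h7
            · exfalso; exact h ⟨by omega, hrest⟩
          omega
      simp only [hi2]
      rw [ih (palette ++ [pvBorderColor[i]!]) ((i+1) % 7) (Nat.mod_lt _ (by omega))
            (by simp only [List.length_append, List.length_cons, List.length_nil]; omega)]
      simp [pvCyc, List.append_assoc]
    · -- exactly one element left to add: n = 0, loop exits next round
      have hn0 : n = 0 := by
        simp only [List.length_append, List.length_cons, List.length_nil] at hrest; omega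
      subst hn0
      rw [pvALoop]
      have : ¬ ((if i + 1 = pvBorderColor.length ∧ ((palette ++ [pvBorderColor[i]!]).length : Int) < amount then 0 else i + 1) < pvBorderColor.length ∧ ((palette ++ [pvBorderColor[i]!]).length : Int) < amount) := by
        intro hc; exact hrest hc.2
      rw [dif_neg this]
      simp [pvCyc]

theorem pvCyc_le7 : ∀ n, n ≤ 7 → pvCyc n 0 = pvBorderColor.take n := by
  intro n hn
  interval_cases n <;> simp [pvCyc, pvBorderColor]

theorem pvCyc_add7 (n : ℕ) : pvCyc (n + 7) 0 = pvBorderColor ++ pvCyc n 0 := by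
  show pvCyc (n+6+1) 0 = _
  rw [pvCyc]; norm_num
  show _ :: pvCyc (n+5+1) 1 = _
  rw [pvCyc]; norm_num
  show _ :: _ :: pvCyc (n+4+1) 2 = _
  rw [pvCyc]; norm_num
  show _ :: _ :: _ :: pvCyc (n+3+1) 3 = _
  rw [pvCyc]; norm_num
  show _ :: _ :: _ :: _ :: pvCyc (n+2+1) 4 = _
  rw [pvCyc]; norm_num
  show _ :: _ :: _ :: _ :: _ :: pvCyc (n+1+1) 5 = _
  rw [pvCyc]; norm_num
  show _ :: _ :: _ :: _ :: _ :: _ :: pvCyc (n+1) 6 = _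
  rw [pvCyc]; norm_num
  simp [pvBorderColor]

theorem pvTake_flatten : ∀ (m n : ℕ), n ≤ 7 * m →
    ((List.replicate m pvBorderColor).flatten).take n = pvCyc n 0 := by
  intro m
  induction m with
  | zero => intro n hn; interval_cases n; simp [pvCyc]
  | succ m ih =>
    intro n hn
    rw [List.replicate_succ, List.flatten_cons, List.take_append]
    by_cases h7 : n ≤ 7
    · have : n - pvBorderColor.length = 0 := by simp [pvBorderColor]; omega
      rw [this, List.take_zero, List.append_nil, pvCyc_le7 n h7]
    · obtain ⟨n', rfl⟩ : ∃ n', n = n' + 7 := ⟨n - 7, by omega⟩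
      have : n' + 7 - pvBorderColor.length = n' := by simp [pvBorderColor]
      rw [this, ih n' (by omega), pvCyc_add7,
          List.take_of_length_le (by simp [pvBorderColor])]

-- ===== VERDICT (by name: the statement is the Claim_ definition above) =====
theorem generate_color_palette_border_spec : Claim_equal_generate_color_palette_border := by
  unfold Claim_equal_generate_color_palette_border Spec_generate_color_palette_border
  intro amount _
  unfold generate_color_palette_border generate_color_palette_border_alt
  by_cases hpos : 0 ≤ amount
  · have h7 : PySem.Int.floordiv amount 7 = amount / 7 :=
      PySem.Int.floordiv_eq_ediv_of_pos (by omega)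
    rw [pvALoop_eq_cyc amount amount.toNat [] 0 (by omega) (by simp),
        PySem.List.slice_to _ hpos, h7]
    have hle : amount.toNat ≤ 7 * (amount / 7 + 1).toNat := by omega
    rw [pvTake_flatten _ _ hle]
    simp
  · have h7' : (amount / 7 + 1).toNat = 0 := by omega
    have h0 : ¬ (0 < amount) := by omega
    rw [pvALoop]
    simp [h7', h0, PySem.List.slice]
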